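-- pv_equiv track=rewrite | github.com/SteveGJones/ai-first-sdlc-practices | tools/coaching/simple_team_coach.py | get_match_confidence
-- ===== SOURCE A (Python) =====
-- def get_match_confidence(project: str, team_type: str) -> tuple:
--     """Determine confidence in team selection and explain why"""
--     project_lower = project.lower()
--
--     # High confidence matches
--     if team_type == "crisis" and "production down" in project_lower:
--         return "HIGH", "Strong crisis signals detected"
--     elif team_type == "ai_system" and any(w in project_lower for w in ["chatbot", "llm", "gpt"]):
--         return "HIGH", "Clear AI/ML project indicators"
--     elif team_type == "mobile_app" and any(w in project_lower for w in ["ios", "android", "mobile"]):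
--         return "HIGH", "Explicit mobile platform mentioned"
--     elif team_type == "data_platform" and any(w in project_lower for w in ["pipeline", "etl", "warehouse"]):
--         return "HIGH", "Data infrastructure keywords found"
--     elif team_type == "api_service" and any(w in project_lower for w in ["rest", "graphql", "microservice"]):
--         return "HIGH", "API/service architecture specified"
--     elif team_type == "web_app" and any(w in project_lower for w in ["web", "dashboard", "portal"]):
--         return "MEDIUM", "Web application indicators present"
--     else:
--         return "LOW", "Default team selected - consider being more specific"
-- ===== SOURCE B (Python) =====
-- # B: inverted evaluation order — scan ALL keyword rules against the project text first,
-- # building the set of triggered team types, then look the requested team_type up.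
-- _RULES = [
--     ("crisis", ["production down"], "HIGH", "Strong crisis signals detected"),
--     ("ai_system", ["chatbot", "llm", "gpt"], "HIGH", "Clear AI/ML project indicators"),
--     ("mobile_app", ["ios", "android", "mobile"], "HIGH", "Explicit mobile platform mentioned"),
--     ("data_platform", ["pipeline", "etl", "warehouse"], "HIGH", "Data infrastructure keywords found"),
--     ("api_service", ["rest", "graphql", "microservice"], "HIGH", "API/service architecture specified"),
--     ("web_app", ["web", "dashboard", "portal"], "MEDIUM", "Web application indicators present"),
-- ]
--
-- def get_match_confidence(project: str, team_type: str) -> tuple: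
--     p = project.lower()
--     fired = {}
--     for tt, kws, conf, msg in _RULES:
--         for w in kws:
--             if w in p:
--                 fired[tt] = (conf, msg)
--                 break
--     return fired.get(team_type, ("LOW", "Default team selected - consider being more specific"))
-- ===== Notes on version B (the rewrite author's own statement) =====
-- stated objective: alternative
-- what changed: Inverted the evaluation order: instead of branching on team_type and then scanning that branch's keywords, B scans every keyword rule against the lowercased project once, accumulating a dict of all triggered team types, and finishes with a single dict lookup of team_type.
import Mathlib
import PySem

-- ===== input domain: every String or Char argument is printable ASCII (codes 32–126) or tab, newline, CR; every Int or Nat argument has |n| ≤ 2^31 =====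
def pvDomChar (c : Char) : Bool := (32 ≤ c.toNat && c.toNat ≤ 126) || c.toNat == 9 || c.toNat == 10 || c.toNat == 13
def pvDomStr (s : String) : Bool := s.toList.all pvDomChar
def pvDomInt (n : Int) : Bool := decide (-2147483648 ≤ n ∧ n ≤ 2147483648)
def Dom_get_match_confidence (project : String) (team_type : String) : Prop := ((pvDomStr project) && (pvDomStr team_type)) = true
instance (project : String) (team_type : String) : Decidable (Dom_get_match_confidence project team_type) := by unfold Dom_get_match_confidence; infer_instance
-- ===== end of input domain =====

-- B inverts A's evaluation order: it scans every keyword rule against the project first,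
-- accumulating the triggered team types in a dict, then looks team_type up once; objective: alternative.

-- ===== PORT A =====
def get_match_confidence (project : String) (team_type : String) : String × String :=
  let project_lower := PySem.Str.lower project
  if team_type == "crisis" && PySem.Str.isIn "production down" project_lower then
    ("HIGH", "Strong crisis signals detected")
  else if team_type == "ai_system" && (["chatbot", "llm", "gpt"].any fun w => PySem.Str.isIn w project_lower) then
    ("HIGH", "Clear AI/ML project indicators")
  else if team_type == "mobile_app" && (["ios", "android", "mobile"].any fun w => PySem.Str.isIn w project_lower) then
    ("HIGH", "Explicit mobile platform mentioned")
  else if team_type == "data_platform" && (["pipeline", "etl", "warehouse"].any fun w => PySem.Str.isIn w project_lower) then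
    ("HIGH", "Data infrastructure keywords found")
  else if team_type == "api_service" && (["rest", "graphql", "microservice"].any fun w => PySem.Str.isIn w project_lower) then
    ("HIGH", "API/service architecture specified")
  else if team_type == "web_app" && (["web", "dashboard", "portal"].any fun w => PySem.Str.isIn w project_lower) then
    ("MEDIUM", "Web application indicators present")
  else
    ("LOW", "Default team selected - consider being more specific")

-- ===== PORT B =====
def pvRules : List (String × List String × String × String) :=
  [("crisis", ["production down"], "HIGH", "Strong crisis signals detected"),
   ("ai_system", ["chatbot", "llm", "gpt"], "HIGH", "Clear AI/ML project indicators"),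
   ("mobile_app", ["ios", "android", "mobile"], "HIGH", "Explicit mobile platform mentioned"),
   ("data_platform", ["pipeline", "etl", "warehouse"], "HIGH", "Data infrastructure keywords found"),
   ("api_service", ["rest", "graphql", "microservice"], "HIGH", "API/service architecture specified"),
   ("web_app", ["web", "dashboard", "portal"], "MEDIUM", "Web application indicators present")]

def get_match_confidence_alt (project : String) (team_type : String) : String × String :=
  let p := PySem.Str.lower project
  -- the inner 'for w in kws: … break' fires the rule on the first matching keyword,
  -- i.e. exactly when some keyword matches (the inserted value does not depend on w)
  let fired : PySem.Dict String (String × String) :=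
    pvRules.foldl
      (fun d r => if r.2.1.any (fun w => PySem.Str.isIn w p) then d.insert r.1 (r.2.2.1, r.2.2.2) else d)
      PySem.Dict.empty
  fired.getD team_type ("LOW", "Default team selected - consider being more specific")

-- ===== PRECONDITION & SPEC =====
def Spec_get_match_confidence (project : String) (team_type : String) (out : String × String) : Prop := out = get_match_confidence_alt project team_type
instance (project : String) (team_type : String) (out : String × String) : Decidable (Spec_get_match_confidence project team_type out) := by unfold Spec_get_match_confidence; infer_instance

-- ===== CLAIM (what is proved, stated in full; the proofs are below) =====
def Claim_equal_get_match_confidence : Prop := ∀ (project : String) (team_type : String), Dom_get_match_confidence project team_type → Spec_get_match_confidence project team_type (get_match_confidence project team_type)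

-- ===== LEMMAS AND PROOFS =====
set_option maxHeartbeats 1000000 in
theorem get_match_confidence_spec_aux (project team_type : String) :
    get_match_confidence project team_type = get_match_confidence_alt project team_type := by
  unfold get_match_confidence get_match_confidence_alt pvRules
  simp only [List.foldl, List.any]
  by_cases h1 : PySem.Str.isIn "production down" (PySem.Str.lower project) = true <;>
  by_cases h2 : (["chatbot", "llm", "gpt"].any fun w => PySem.Str.isIn w (PySem.Str.lower project)) = true <;>
  by_cases h3 : (["ios", "android", "mobile"].any fun w => PySem.Str.isIn w (PySem.Str.lower project)) = true <;>
  by_cases h4 : (["pipeline", "etl", "warehouse"].any fun w => PySem.Str.isIn w (PySem.Str.lower project)) = true <;>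
  by_cases h5 : (["rest", "graphql", "microservice"].any fun w => PySem.Str.isIn w (PySem.Str.lower project)) = true <;>
  by_cases h6 : (["web", "dashboard", "portal"].any fun w => PySem.Str.isIn w (PySem.Str.lower project)) = true <;>
  simp_all [List.any, PySem.Dict.getD_insert, PySem.Dict.getD_empty] <;>
  split_ifs <;> simp_all

-- ===== VERDICT (by name: the statement is the Claim_ definition above) =====
theorem get_match_confidence_spec : Claim_equal_get_match_confidence := by
  intro project team_type _
  exact get_match_confidence_spec_aux project team_type
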